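-- pv_equiv track=rewrite | github.com/ishtiiyak/dsaCoursera | algorithmstoolbox/week3/car_fueling.py | min_refills
-- ===== SOURCE A (Python) =====
-- def min_refills(distance, tank, stops):
--     # Include the start point (0) and the destination
--     stops = [0] + stops + [distance]
--     num_refills = 0
--     current_location = 0
--     current_index = 0
--     n = len(stops)
--
--     while current_index < n - 1:  # while we haven't reached the destination
--         last_refill = current_index
--
--         # Move to the farthest stop reachable with the current fuel
--         while (current_index < n - 1 and
--                stops[current_index + 1] - stops[last_refill] <= tank):
--             current_index += 1
--
--         # If no further stop can be reached, we need to refill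
--         if current_index == last_refill:
--             return -1  # Cannot reach the next stop
--
--         # If we haven't reached the last stop yet, increment refills
--         if current_index < n - 1:
--             num_refills += 1
--
--     return num_refills
-- ===== SOURCE B (Python) =====
-- def min_refills(distance, tank, stops):
--     # Fuel simulation over consecutive segments: no index bookkeeping at all.
--     fuel = tank
--     prev = 0
--     num_refills = 0
--     for x in stops + [distance]:
--         d = x - prev
--         if fuel < d:
--             num_refills += 1
--             fuel = tank
--             if fuel < d:
--                 return -1
--         fuel -= d
--         prev = x
--     return num_refills
-- ===== Notes on version B (the rewrite author's own statement) =====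
-- stated objective: alternative
-- what changed: A's index-based greedy (nested while loops advancing to the farthest stop reachable from the last-refill index) is replaced by a fuel simulation: a single pass over the stop values that maintains remaining fuel across consecutive segment lengths and refills when the next segment exceeds the fuel, with no index bookkeeping at all.
import Mathlib
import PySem

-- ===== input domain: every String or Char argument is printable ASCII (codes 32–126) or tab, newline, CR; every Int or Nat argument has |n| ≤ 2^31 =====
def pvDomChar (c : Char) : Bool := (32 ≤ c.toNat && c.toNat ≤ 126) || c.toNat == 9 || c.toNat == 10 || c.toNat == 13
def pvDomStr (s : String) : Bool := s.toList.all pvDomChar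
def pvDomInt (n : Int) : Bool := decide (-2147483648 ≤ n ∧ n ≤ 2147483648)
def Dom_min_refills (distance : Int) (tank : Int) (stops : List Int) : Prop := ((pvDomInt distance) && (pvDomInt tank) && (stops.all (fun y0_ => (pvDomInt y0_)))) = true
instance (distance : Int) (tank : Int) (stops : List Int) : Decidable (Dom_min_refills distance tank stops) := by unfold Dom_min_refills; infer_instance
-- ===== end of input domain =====

-- B replaces A's index-based greedy (nested while loops advancing to the farthest stop
-- reachable from the last refill index) by a fuel simulation: a single pass over the stop
-- values that keeps the remaining fuel across consecutive segment lengths and refills when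
-- the next segment exceeds the fuel; objective: alternative (same O(n) cost, different state).
-- All list indices in A are provably in range, so `List.getD _ _ 0` is exact for `stops[k]`.

-- ===== PORT A =====
-- stops = [0] + stops + [distance]
def pvPts (distance : Int) (stops : List Int) : List Int := 0 :: (stops ++ [distance])

-- inner while loop of A: advance current_index while the next stop is reachable from last_refill
def pvInner (pts : List Int) (tank : Int) (lr ci : Nat) : Nat :=
  if _h : ci < pts.length - 1 ∧ pts.getD (ci + 1) 0 - pts.getD lr 0 ≤ tank then
    pvInner pts tank lr (ci + 1)
  else ci
termination_by pts.length - 1 - ci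
decreasing_by omega

-- needed only for pvOuter's termination
theorem pvInner_ge (pts : List Int) (tank : Int) (lr ci : Nat) : ci ≤ pvInner pts tank lr ci := by
  fun_induction pvInner pts tank lr ci
  all_goals omega

-- outer while loop of A
def pvOuter (pts : List Int) (tank : Int) (ci : Nat) (num : Int) : Int :=
  if _h1 : ci < pts.length - 1 then
    if _h2 : pvInner pts tank ci ci = ci then -1
    else if _h3 : pvInner pts tank ci ci < pts.length - 1 then
      pvOuter pts tank (pvInner pts tank ci ci) (num + 1)
    else num
  else num
termination_by pts.length - 1 - ci
decreasing_by have := pvInner_ge pts tank ci ci; omega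

def min_refills (distance : Int) (tank : Int) (stops : List Int) : Int :=
  pvOuter (pvPts distance stops) tank 0 0

-- ===== PORT B =====
-- B's for-loop over x in stops + [distance] with state (fuel, prev, num_refills)
def pvFuel (tank : Int) (fuel prev num : Int) (rest : List Int) : Int :=
  match rest with
  | [] => num
  | x :: xs =>
    let d := x - prev
    if fuel < d then
      if tank < d then -1
      else pvFuel tank (tank - d) x (num + 1) xs
    else pvFuel tank (fuel - d) x num xs

def min_refills_alt (distance : Int) (tank : Int) (stops : List Int) : Int :=
  pvFuel tank tank 0 0 (stops ++ [distance])

-- ===== PRECONDITION & SPEC =====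
def Spec_min_refills (distance : Int) (tank : Int) (stops : List Int) (out : Int) : Prop := out = min_refills_alt distance tank stops
instance (distance : Int) (tank : Int) (stops : List Int) (out : Int) : Decidable (Spec_min_refills distance tank stops out) := by unfold Spec_min_refills; infer_instance

-- ===== CLAIM (what is proved, stated in full; the proofs are below) =====
def Claim_equal_min_refills : Prop := ∀ (distance : Int) (tank : Int) (stops : List Int), Dom_min_refills distance tank stops → Spec_min_refills distance tank stops (min_refills distance tank stops)

-- ===== LEMMAS AND PROOFS =====

-- characterisation of A's inner while loop: it stops exactly at the first index j ≥ ci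
-- whose advance condition fails, provided every step before j is allowed
theorem pvInner_stop (pts : List Int) (tank : Int) (lr : Nat) (ci j : Nat)
    (hstop : ¬(j < pts.length - 1 ∧ pts.getD (j + 1) 0 - pts.getD lr 0 ≤ tank)) :
    ci ≤ j →
    (∀ k, ci ≤ k → k < j → k < pts.length - 1 ∧ pts.getD (k + 1) 0 - pts.getD lr 0 ≤ tank) →
    pvInner pts tank lr ci = j := by
  fun_induction pvInner pts tank lr ci with
  | case1 ci h ih =>
    intro hcij hsteps
    have hne : ci ≠ j := by intro e; subst e; exact hstop h
    exact ih (by omega) (fun k hk1 hk2 => hsteps k (by omega) hk2)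
  | case2 ci h =>
    intro hcij hsteps
    rcases Nat.lt_or_ge ci j with hlt | hge
    · exact absurd (hsteps ci le_rfl hlt) h
    · omega

-- main invariant: B's fuel simulation about to process stop k (rest = pts.drop k,
-- prev = pts[k-1], fuel = tank - (pts[k-1] - pts[lr]), lr the last-refill index with every
-- stop strictly between lr and k reachable from lr) computes exactly A's outer loop from lr
theorem pvKey (pts : List Int) (tank : Int) :
    ∀ (rest : List Int) (k lr : Nat) (num : Int),
      rest = pts.drop k → 1 ≤ k → k ≤ pts.length → lr < k → lr < pts.length - 1 →
      (∀ j, lr < j → j < k → pts.getD j 0 - pts.getD lr 0 ≤ tank) →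
      pvFuel tank (tank - (pts.getD (k - 1) 0 - pts.getD lr 0)) (pts.getD (k - 1) 0) num rest
        = pvOuter pts tank lr num := by
  intro rest
  induction rest with
  | nil =>
    intro k lr num hrest hk1 hkn hlrk hlr hgap
    have hkeq : k = pts.length := by
      have := congrArg List.length hrest
      simp [List.length_drop] at this
      omega
    have hinner : pvInner pts tank lr lr = pts.length - 1 := by
      apply pvInner_stop _ _ _ _ _ (by omega) (by omega)
      intro j hj1 hj2
      exact ⟨by omega, hgap (j + 1) (by omega) (by omega)⟩
    rw [pvFuel, pvOuter, dif_pos hlr, hinner,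
      dif_neg (show ¬(pts.length - 1 = lr) by omega),
      dif_neg (show ¬(pts.length - 1 < pts.length - 1) by omega)]
  | cons x xs ih =>
    intro k lr num hrest hk1 hkn hlrk hlr hgap
    have hklt : k < pts.length := by
      have := congrArg List.length hrest
      simp [List.length_drop] at this
      omega
    have hdk : pts.drop k = pts.getD k 0 :: pts.drop (k + 1) := by
      rw [List.getD_eq_getElem _ _ hklt]
      exact List.drop_eq_getElem_cons hklt
    rw [hdk] at hrest
    injection hrest with hx hxs
    subst hx; subst hxs
    rw [pvFuel]
    by_cases hviol : tank - (pts.getD (k - 1) 0 - pts.getD lr 0) < pts.getD k 0 - pts.getD (k - 1) 0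
    · -- stop k unreachable from lr: refill at k-1
      rw [if_pos hviol]
      by_cases hstuck : tank < pts.getD k 0 - pts.getD (k - 1) 0
      · -- still unreachable after refilling at k-1: both return -1
        rw [if_pos hstuck]
        by_cases hle : lr = k - 1
        · have hinner : pvInner pts tank lr lr = lr := by
            apply pvInner_stop _ _ _ _ _ ?_ le_rfl (by intro j h1 h2; omega)
            rw [show lr + 1 = k by omega, hle]
            intro ⟨_, h⟩; omega
          rw [pvOuter, dif_pos hlr, dif_pos hinner]
        · have hinner : pvInner pts tank lr lr = k - 1 := by
            apply pvInner_stop _ _ _ _ _ ?_ (by omega)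
              (fun j h1 h2 => ⟨by omega, hgap (j + 1) (by omega) (by omega)⟩)
            rw [show k - 1 + 1 = k by omega]
            intro ⟨_, h⟩; omega
          have hlt : k - 1 < pts.length - 1 := by omega
          have hinner2 : pvInner pts tank (k - 1) (k - 1) = k - 1 := by
            apply pvInner_stop _ _ _ _ _ ?_ le_rfl (by intro j h1 h2; omega)
            rw [show k - 1 + 1 = k by omega]
            intro ⟨_, h⟩; omega
          rw [pvOuter, dif_pos hlr, hinner, dif_neg (show ¬(k - 1 = lr) by omega),
            dif_pos hlt, pvOuter, dif_pos hlt, dif_pos hinner2]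
      · -- refill at k-1 and continue: A refills there too
        rw [if_neg hstuck]
        have hle : lr ≠ k - 1 := by
          intro e; rw [e] at hviol; omega
        have hinner : pvInner pts tank lr lr = k - 1 := by
          apply pvInner_stop _ _ _ _ _ ?_ (by omega)
            (fun j h1 h2 => ⟨by omega, hgap (j + 1) (by omega) (by omega)⟩)
          rw [show k - 1 + 1 = k by omega]
          intro ⟨_, h⟩; omega
        have hlt : k - 1 < pts.length - 1 := by omega
        rw [pvOuter, dif_pos hlr, hinner, dif_neg (show ¬(k - 1 = lr) by omega), dif_pos hlt]
        have hrec := ih (k + 1) (k - 1) (num + 1) rfl (by omega) (by omega) (by omega) hlt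
          (by intro j h1 h2
              rw [show j = k by omega]
              omega)
        simp only [Nat.add_sub_cancel] at hrec
        exact hrec
    · -- stop k reachable from lr: just advance
      rw [if_neg hviol]
      have harg : tank - (pts.getD (k - 1) 0 - pts.getD lr 0) - (pts.getD k 0 - pts.getD (k - 1) 0)
          = tank - (pts.getD k 0 - pts.getD lr 0) := by ring
      rw [harg]
      have hrec := ih (k + 1) lr num rfl (by omega) (by omega) (by omega) hlr
        (by intro j h1 h2
            rcases Nat.lt_or_ge j k with hlt | hge
            · exact hgap j h1 hlt
            · rw [show j = k by omega]; omega)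
      simp only [Nat.add_sub_cancel] at hrec
      exact hrec

-- ===== VERDICT (by name: the statement is the Claim_ definition above) =====
theorem min_refills_spec : Claim_equal_min_refills := by
  intro distance tank stops _
  unfold Spec_min_refills min_refills min_refills_alt
  have hlen : (pvPts distance stops).length = stops.length + 2 := by simp [pvPts]
  have h := pvKey (pvPts distance stops) tank (stops ++ [distance]) 1 0 0
    (by simp [pvPts]) (by omega) (by omega) (by omega) (by omega)
    (by intro j h1 h2; omega)
  have h0 : (pvPts distance stops).getD 0 0 = 0 := by simp [pvPts]
  rw [show (1 : Nat) - 1 = 0 from rfl, h0] at h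
  rw [show tank - ((0 : Int) - 0) = tank by ring] at h
  exact h.symm
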